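-- pv_equiv track=rewrite | github.com/scmartinez-gus/gepbillingengine | billing_portal.py | status_from_audit_rows
-- ===== SOURCE A (Python) =====
-- from typing import Any, Dict, List, Optional, Tuple
--
-- def status_from_audit_rows(audit_rows: List[Dict[str, Any]]) -> str:
--     statuses = [str(row.get("Status", "")).upper() for row in audit_rows]
--     if any(status == "FAIL" for status in statuses):
--         return "FAIL"
--     if any(status == "REVIEW REQUIRED" for status in statuses):
--         return "REVIEW REQUIRED"
--     if any(status == "PASS" for status in statuses):
--         return "PASS"
--     return "UNKNOWN"
-- ===== SOURCE B (Python) =====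
-- def status_from_audit_rows(audit_rows):
--     saw_fail = saw_review = saw_pass = False
--     for row in audit_rows:
--         s = str(row.get("Status", "")).upper()
--         if s == "FAIL":
--             saw_fail = True
--         elif s == "REVIEW REQUIRED":
--             saw_review = True
--         elif s == "PASS":
--             saw_pass = True
--     if saw_fail:
--         return "FAIL"
--     if saw_review:
--         return "REVIEW REQUIRED"
--     if saw_pass:
--         return "PASS"
--     return "UNKNOWN"
-- ===== Notes on version B (the rewrite author's own statement) =====
-- stated objective: alternative
-- what changed: Replaces the build-status-list-then-three-any()-scans structure with a single pass over the rows that maintains three boolean flags and decides the priority status once after the loop.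
import Mathlib
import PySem

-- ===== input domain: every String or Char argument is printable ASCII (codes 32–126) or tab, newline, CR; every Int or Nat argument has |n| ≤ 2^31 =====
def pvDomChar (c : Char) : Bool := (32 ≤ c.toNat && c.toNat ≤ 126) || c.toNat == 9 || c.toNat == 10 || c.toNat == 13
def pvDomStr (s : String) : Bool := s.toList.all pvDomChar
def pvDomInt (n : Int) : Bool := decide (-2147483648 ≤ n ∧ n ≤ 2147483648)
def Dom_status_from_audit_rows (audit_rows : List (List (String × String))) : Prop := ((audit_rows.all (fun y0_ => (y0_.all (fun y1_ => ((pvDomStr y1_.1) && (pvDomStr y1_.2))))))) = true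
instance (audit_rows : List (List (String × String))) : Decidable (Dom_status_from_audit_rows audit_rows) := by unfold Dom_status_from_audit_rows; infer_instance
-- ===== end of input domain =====

-- B replaces A's build-status-list-then-three-any-scans with one flag-maintaining pass (alternative decomposition, same cost).

-- ===== PORT A =====
def pvStat (row : List (String × String)) : String :=
  PySem.Str.upper ((PySem.Dict.mk row).getD "Status" "")

def status_from_audit_rows (audit_rows : List (List (String × String))) : String :=
  let statuses := audit_rows.map pvStat
  if statuses.any (fun status => status == "FAIL") then "FAIL"
  else if statuses.any (fun status => status == "REVIEW REQUIRED") then "REVIEW REQUIRED"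
  else if statuses.any (fun status => status == "PASS") then "PASS"
  else "UNKNOWN"

-- ===== PORT B =====
def pvStep (st : Bool × Bool × Bool) (row : List (String × String)) : Bool × Bool × Bool :=
  let s := PySem.Str.upper ((PySem.Dict.mk row).getD "Status" "")
  if s == "FAIL" then (true, st.2.1, st.2.2)
  else if s == "REVIEW REQUIRED" then (st.1, true, st.2.2)
  else if s == "PASS" then (st.1, st.2.1, true)
  else st

def status_from_audit_rows_alt (audit_rows : List (List (String × String))) : String :=
  let flags := audit_rows.foldl pvStep (false, false, false)
  if flags.1 then "FAIL"
  else if flags.2.1 then "REVIEW REQUIRED"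
  else if flags.2.2 then "PASS"
  else "UNKNOWN"

-- ===== PRECONDITION & SPEC =====
def Spec_status_from_audit_rows (audit_rows : List (List (String × String))) (out : String) : Prop := out = status_from_audit_rows_alt audit_rows
instance (audit_rows : List (List (String × String))) (out : String) : Decidable (Spec_status_from_audit_rows audit_rows out) := by unfold Spec_status_from_audit_rows; infer_instance

-- ===== CLAIM (what is proved, stated in full; the proofs are below) =====
def Claim_equal_status_from_audit_rows : Prop := ∀ (audit_rows : List (List (String × String))), Dom_status_from_audit_rows audit_rows → Spec_status_from_audit_rows audit_rows (status_from_audit_rows audit_rows)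

-- ===== LEMMAS AND PROOFS =====

theorem pvFoldl_flags (rows : List (List (String × String))) (f r p : Bool) :
    rows.foldl pvStep (f, r, p) =
      (f || rows.any (fun row => pvStat row == "FAIL"),
       r || rows.any (fun row => pvStat row == "REVIEW REQUIRED"),
       p || rows.any (fun row => pvStat row == "PASS")) := by
  induction rows generalizing f r p with
  | nil => simp
  | cons row rest ih =>
    simp only [List.foldl_cons, List.any_cons, pvStep, pvStat]
    split_ifs with h1 h2 h3
    · have e := eq_of_beq h1; rw [ih]; simp [pvStat, e]
    · have e := eq_of_beq h2; rw [ih]; simp [pvStat, e]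
    · have e := eq_of_beq h3; rw [ih]; simp [pvStat, e]
    · simp [ih, pvStat, h1, h2, h3]

-- ===== VERDICT (by name: the statement is the Claim_ definition above) =====
theorem status_from_audit_rows_spec : Claim_equal_status_from_audit_rows := by
  intro rows _
  unfold Spec_status_from_audit_rows status_from_audit_rows status_from_audit_rows_alt
  simp only [pvFoldl_flags, Bool.false_or, List.any_map]
  rfl
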